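-- pv_equiv track=rewrite | github.com/einigl/informative-obs-paper | paper-1/ism_lines_helpers.py | molecule_and_transition
-- ===== SOURCE A (Python) =====
-- from typing import List, Tuple, Union, Optional
--
-- _molecules_to_latex = {
--     "h": "H",
--     "h2": "H_2",
--     "hd": "HD",
--     "co": "^{12}CO",
--     "13c_o": "^{13}CO",
--     "c_18o": "C^{18}O",
--     "13c_18o": "^{13}C^{18}O",
--     "c": "C",
--     "n": "N",
--     "o": "O",
--     "s": "S",
--     "si": "Si",
--     "cs": "^{12}CS",
--     "cn": "^{12}CN",
--     "hcn": "HCN",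
--     "hnc": "HNC",
--     "oh": "OH",
--     "h2o": "H_2O",
--     "h2_18o": "H_2^{18}O",
--     "c2h": "C_2H",
--     "c_c3h2": "c-C_3H_2",
--     "so": "SO",
--     "cp": "C^+",
--     "sp": "S^+",
--     "hcop": "HCO^+",
--     "chp": "CH^+",
--     "ohp": "OH^+",
--     "shp": "SH^+",
-- }
--
-- def molecule_and_transition(line_name: str) -> Tuple[str, str]:
--     """
--     Returns the raw strings of the molecule name and the transition.
--
--     Parameters
--     ----------
--     line_name : str
--         Formatted line.
--
--     Returns
--     -------
--     str
--         Raw string representing the molecule.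
--     str
--         Raw string representing the transition.
--     """
--     # Check if the input is in the good format
--     if not "_" in line_name:
--         raise ValueError(f'line_name {line_name} is not in the appropriate format molecule_transition')
--     line_name = line_name.lower().strip()
--
--     # Search for all matching prefixes
--     prefixes = [s for s in _molecules_to_latex if line_name.startswith(s)]
--     if len(prefixes) == 0:
--         return tuple(line_name.split('_', maxsplit=1))
--
--     # Select the longest prefix
--     idxmax = lambda ls: max(range(len(ls)), key=ls.__getitem__)
--     prefix = prefixes[idxmax([len(s) for s in prefixes])]
--
--     # Select the remaining suffix
--     suffix = line_name[len(prefix)+1:]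
--
--     return prefix, suffix
-- ===== SOURCE B (Python) =====
-- from typing import Tuple
--
-- _molecules_to_latex = {
--     "h": "H",
--     "h2": "H_2",
--     "hd": "HD",
--     "co": "^{12}CO",
--     "13c_o": "^{13}CO",
--     "c_18o": "C^{18}O",
--     "13c_18o": "^{13}C^{18}O",
--     "c": "C",
--     "n": "N",
--     "o": "O",
--     "s": "S",
--     "si": "Si",
--     "cs": "^{12}CS",
--     "cn": "^{12}CN",
--     "hcn": "HCN",
--     "hnc": "HNC",
--     "oh": "OH",
--     "h2o": "H_2O",
--     "h2_18o": "H_2^{18}O",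
--     "c2h": "C_2H",
--     "c_c3h2": "c-C_3H_2",
--     "so": "SO",
--     "cp": "C^+",
--     "sp": "S^+",
--     "hcop": "HCO^+",
--     "chp": "CH^+",
--     "ohp": "OH^+",
--     "shp": "SH^+",
-- }
--
-- # Molecule keys pre-sorted by descending length: the first matching prefix is
-- # automatically the longest one (two distinct equal-length prefixes of the same
-- # string are impossible), so a single first-match scan replaces A's
-- # collect-all-then-argmax pass.
-- _keys_by_len_desc = sorted(_molecules_to_latex, key=len, reverse=True)
--
-- def molecule_and_transition(line_name: str) -> Tuple[str, str]:
--     if "_" not in line_name: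
--         raise ValueError(f'line_name {line_name} is not in the appropriate format molecule_transition')
--     line_name = line_name.lower().strip()
--     for k in _keys_by_len_desc:
--         if line_name.startswith(k):
--             return k, line_name[len(k) + 1:]
--     return tuple(line_name.split('_', maxsplit=1))
-- ===== Notes on version B (the rewrite author's own statement) =====
-- stated objective: simpler
-- what changed: Replaces A's collect-all-matching-prefixes-then-argmax-by-length pass with a single first-match scan over the molecule keys pre-sorted once by descending length (the first match is necessarily the longest prefix).
import Mathlib
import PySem

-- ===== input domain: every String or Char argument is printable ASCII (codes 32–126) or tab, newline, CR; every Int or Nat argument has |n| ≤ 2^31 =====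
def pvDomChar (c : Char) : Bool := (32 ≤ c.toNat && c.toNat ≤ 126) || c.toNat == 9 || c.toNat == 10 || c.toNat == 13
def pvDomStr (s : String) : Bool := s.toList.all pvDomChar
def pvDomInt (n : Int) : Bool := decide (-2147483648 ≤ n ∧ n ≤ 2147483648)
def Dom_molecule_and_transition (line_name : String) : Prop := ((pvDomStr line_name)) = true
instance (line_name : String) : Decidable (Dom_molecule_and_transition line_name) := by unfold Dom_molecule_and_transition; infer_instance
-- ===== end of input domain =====

-- B replaces A's collect-all-matching-prefixes-then-argmax-by-length pass with a single
-- first-match scan over the molecule keys pre-sorted once by descending length (simpler).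

-- ===== PORT A =====

-- keys of the module dict _molecules_to_latex, in insertion order (only the keys are used)
def pvMoleculeKeys : List String :=
  ["h", "h2", "hd", "co", "13c_o", "c_18o", "13c_18o", "c", "n", "o", "s", "si",
   "cs", "cn", "hcn", "hnc", "oh", "h2o", "h2_18o", "c2h", "c_c3h2", "so", "cp",
   "sp", "hcop", "chp", "ohp", "shp"]

-- idxmax = lambda ls: max(range(len(ls)), key=ls.__getitem__); ls.__getitem__ is exact here
-- because max only applies it to the indices of range(len(ls)), all in range (default unused)
def pvIdxmax (ls : List Int) : Int :=
  (PySem.List.max? (PySem.List.pyRange 0 ls.length 1) (fun i => PySem.List.pyGetD ls i 0)).getD 0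

-- the search after the guard; ln is line_name.lower().strip()
def pvSearchA (ln : String) : String × String :=
    let prefixes := pvMoleculeKeys.filter (fun s => PySem.Str.startswith ln s)
    if prefixes.length = 0 then
      -- tuple(line_name.split('_', maxsplit=1)); under Pre_ '_' is in ln, so exactly 2 pieces
      match PySem.Str.splitMax? ln "_" 1 with
      | some [a, b] => (a, b)
      | _ => ("", "")  -- unreachable under Pre_
    else
      let idx := pvIdxmax (prefixes.map (fun s => PySem.Str.len s))
      let pfx := PySem.List.pyGetD prefixes idx ""  -- prefixes[idx], idx always in range
      let suffix := PySem.Str.slice ln (some (PySem.Str.len pfx + 1)) none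
      (pfx, suffix)

def molecule_and_transition (line_name : String) : String × String :=
  if PySem.Str.isIn "_" line_name = false then
    ("", "")  -- Python raises ValueError here: excluded by Pre_
  else
    pvSearchA (PySem.Str.strip (PySem.Str.lower line_name))

-- ===== PORT B =====

-- B's own copy of the module dict's keys, in insertion order
def pvMoleculeKeysB : List String :=
  ["h", "h2", "hd", "co", "13c_o", "c_18o", "13c_18o", "c", "n", "o", "s", "si",
   "cs", "cn", "hcn", "hnc", "oh", "h2o", "h2_18o", "c2h", "c_c3h2", "so", "cp",
   "sp", "hcop", "chp", "ohp", "shp"]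

-- _keys_by_len_desc = sorted(_molecules_to_latex, key=len, reverse=True), computed once
def pvKeysByLenDesc : List String :=
  PySem.List.sorted pvMoleculeKeysB (fun s => PySem.Str.len s) true

-- the first-match scan after the guard; ln is line_name.lower().strip()
def pvSearchB (ln : String) : String × String :=
    match pvKeysByLenDesc.find? (fun k => PySem.Str.startswith ln k) with
    | some k => (k, PySem.Str.slice ln (some (PySem.Str.len k + 1)) none)
    | none =>
      -- tuple(line_name.split('_', maxsplit=1)); under Pre_ exactly 2 pieces
      match PySem.Str.splitMax? ln "_" 1 with
      | none => ("", "")  -- unreachable: sep "_" is not empty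
      | some l =>
        -- the 2-tuple of the pieces, one cons cell at a time
        match l with
        | [] => ("", "")  -- unreachable: split never returns no pieces
        | a :: rest =>
          match rest with
          | [] => ("", "")  -- unreachable under Pre_
          | b :: rest2 =>
            match rest2 with
            | [] => (a, b)
            | _ :: _ => ("", "")  -- unreachable: maxsplit=1 gives at most 2 pieces

def molecule_and_transition_alt (line_name : String) : String × String :=
  if PySem.Str.isIn "_" line_name = false then
    ("", "")  -- Python raises ValueError here: excluded by Pre_
  else
    pvSearchB (PySem.Str.strip (PySem.Str.lower line_name))

-- ===== PRECONDITION & SPEC =====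

-- Pre_ excludes exactly the inputs without '_', on which Python A raises ValueError.
def Pre_molecule_and_transition (line_name : String) : Prop :=
  PySem.Str.isIn "_" line_name = true
instance (line_name : String) : Decidable (Pre_molecule_and_transition line_name) := by
  unfold Pre_molecule_and_transition; infer_instance

def pvWitness_molecule_and_transition : String := "13c_o_j2_j1"

def Spec_molecule_and_transition (line_name : String) (out : String × String) : Prop :=
  out = molecule_and_transition_alt line_name
instance (line_name : String) (out : String × String) :
    Decidable (Spec_molecule_and_transition line_name out) := by
  unfold Spec_molecule_and_transition; infer_instance

-- ===== CLAIM (what is proved, stated in full; the proofs are below) =====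
def Claim_equal_molecule_and_transition : Prop :=
  ∀ (line_name : String), Dom_molecule_and_transition line_name →
    Pre_molecule_and_transition line_name →
    Spec_molecule_and_transition line_name (molecule_and_transition line_name)

-- ===== LEMMAS AND PROOFS =====

-- two prefixes of the same list with the same length are the same list
theorem pv_prefix_eq_of_len_eq {l p q : List Char} (hp : p <+: l) (hq : q <+: l)
    (h : p.length = q.length) : p = q := by
  rw [List.prefix_iff_eq_take.mp hp, List.prefix_iff_eq_take.mp hq, h]

-- the first match of find? over a length-descending list has maximal length among all matches
theorem pv_find_desc_max {S : List String} {f : String → Bool} {k : String}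
    (hp : S.Pairwise (fun a b => PySem.Str.len b ≤ PySem.Str.len a))
    (hf : S.find? f = some k) :
    ∀ p ∈ S, f p = true → PySem.Str.len p ≤ PySem.Str.len k := by
  induction S with
  | nil => simp at hf
  | cons x t ih =>
    rcases List.pairwise_cons.mp hp with ⟨hx, ht⟩
    by_cases hfx : f x = true
    · rw [List.find?_cons_of_pos hfx] at hf
      cases hf
      intro p hp' _
      rcases List.mem_cons.mp hp' with h | h
      · subst h; exact le_refl _
      · exact hx p h
    · rw [List.find?_cons_of_neg (by simpa using hfx)] at hf
      intro p hp' hfp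
      rcases List.mem_cons.mp hp' with h | h
      · subst h; exact absurd hfp hfx
      · exact ih ht hf p h hfp

-- A's argmax pick: it is a member of prefixes and its length is maximal there
theorem pv_idxmax_pick {prefixes : List String} (hne : prefixes ≠ []) :
    PySem.List.pyGetD prefixes (pvIdxmax (prefixes.map (fun s => PySem.Str.len s))) "" ∈ prefixes ∧
    ∀ p ∈ prefixes, PySem.Str.len p ≤
      PySem.Str.len (PySem.List.pyGetD prefixes
        (pvIdxmax (prefixes.map (fun s => PySem.Str.len s))) "") := by
  have hpos : 0 < prefixes.length := List.length_pos_iff.mpr hne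
  unfold pvIdxmax
  set ls := prefixes.map (fun s => PySem.Str.len s) with hls
  have hlen : ls.length = prefixes.length := by simp [hls]
  cases hmax : PySem.List.max? (PySem.List.pyRange 0 (ls.length : Int) 1)
      (fun i => PySem.List.pyGetD ls i 0) with
  | none =>
    exfalso
    rw [PySem.List.max?_eq_none_iff] at hmax
    have h0 : (0 : Int) ∈ PySem.List.pyRange 0 (ls.length : Int) 1 :=
      (PySem.List.mem_pyRange_one).mpr ⟨le_refl 0, by rw [hlen]; exact_mod_cast hpos⟩
    rw [hmax] at h0
    exact List.not_mem_nil h0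
  | some i =>
    simp only [Option.getD_some]
    have hiR := PySem.List.max?_mem hmax
    obtain ⟨hi0, hin⟩ := (PySem.List.mem_pyRange_one).mp hiR
    obtain ⟨j, rfl⟩ : ∃ j : Nat, i = (j : Int) := ⟨i.toNat, (Int.toNat_of_nonneg hi0).symm⟩
    have hjlt : j < prefixes.length := by rw [hlen] at hin; exact_mod_cast hin
    have hget : PySem.List.pyGetD prefixes ((j : Nat) : Int) "" = prefixes[j] := by
      rw [PySem.List.pyGetD_natCast, List.getD_eq_getElem _ _ hjlt]
    have hkey : PySem.List.pyGetD ls ((j : Nat) : Int) 0 = PySem.Str.len prefixes[j] := by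
      rw [PySem.List.pyGetD_natCast, List.getD_eq_getElem _ _ (by rw [hlen]; exact hjlt)]
      simp [hls]
    constructor
    · rw [hget]; exact List.getElem_mem hjlt
    · intro p hp
      obtain ⟨t, hjt, rfl⟩ := List.getElem_of_mem hp
      have htR : ((t : Nat) : Int) ∈ PySem.List.pyRange 0 (ls.length : Int) 1 :=
        (PySem.List.mem_pyRange_one).mpr
          ⟨Int.natCast_nonneg t, by rw [hlen]; exact_mod_cast hjt⟩
      have hle := PySem.List.max?_isMax hmax _ htR
      have hkeyt : PySem.List.pyGetD ls ((t : Nat) : Int) 0 = PySem.Str.len prefixes[t] := by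
        rw [PySem.List.pyGetD_natCast, List.getD_eq_getElem _ _ (by rw [hlen]; exact hjt)]
        simp [hls]
      rw [hkeyt, hkey] at hle
      rw [hget]
      exact hle

-- pvKeysByLenDesc is length-descending, and a permutation of the key list
theorem pv_desc_pairwise :
    pvKeysByLenDesc.Pairwise (fun a b => PySem.Str.len b ≤ PySem.Str.len a) := by
  unfold pvKeysByLenDesc
  exact PySem.List.sorted_pairwise_rev pvMoleculeKeysB (fun s => PySem.Str.len s)

theorem pv_mem_desc {x : String} : x ∈ pvKeysByLenDesc ↔ x ∈ pvMoleculeKeys := by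
  unfold pvKeysByLenDesc
  rw [PySem.List.mem_sorted pvMoleculeKeysB _ true x]
  rfl

-- A's one-step match on the split result and B's nested match agree on every value
theorem pv_fallback_eq (o : Option (List String)) :
    (match o with
     | some [a, b] => (a, b)
     | _ => (("" : String), ("" : String))) =
    (match o with
     | none => (("" : String), ("" : String))
     | some l =>
       match l with
       | [] => (("" : String), ("" : String))
       | a :: rest =>
         match rest with
         | [] => (("" : String), ("" : String))
         | b :: rest2 =>
           match rest2 with
           | [] => (a, b)
           | _ :: _ => (("" : String), ("" : String))) := by
  rcases o with _ | (_ | ⟨a, _ | ⟨b, _ | ⟨c, t⟩⟩⟩) <;> rfl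

-- the core equality: A's filter+argmax pick and B's first-match scan agree for ANY string ln
theorem pv_core (ln : String) : pvSearchA ln = pvSearchB ln := by
  unfold pvSearchA pvSearchB
  dsimp only
  cases hf : pvKeysByLenDesc.find? (fun k => PySem.Str.startswith ln k) with
  | none =>
    have hfilter : pvMoleculeKeys.filter (fun s => PySem.Str.startswith ln s) = [] := by
      rw [List.filter_eq_nil_iff]
      intro a ha
      have := List.find?_eq_none.mp hf a (pv_mem_desc.mpr ha)
      simpa using this
    rw [hfilter]
    simp only [List.length_nil, if_true]
    exact pv_fallback_eq (PySem.Str.splitMax? ln "_" 1)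
  | some k =>
    have hkf : PySem.Str.startswith ln k = true := List.find?_some hf
    have hkP : k ∈ pvMoleculeKeys.filter (fun s => PySem.Str.startswith ln s) :=
      List.mem_filter.mpr ⟨pv_mem_desc.mp (List.mem_of_find?_eq_some hf), hkf⟩
    have hne : pvMoleculeKeys.filter (fun s => PySem.Str.startswith ln s) ≠ [] :=
      List.ne_nil_of_mem hkP
    obtain ⟨hmem, hmaxP⟩ := pv_idxmax_pick hne
    have hpfxf : PySem.Str.startswith ln
        (PySem.List.pyGetD (pvMoleculeKeys.filter (fun s => PySem.Str.startswith ln s))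
          (pvIdxmax ((pvMoleculeKeys.filter (fun s => PySem.Str.startswith ln s)).map
            (fun s => PySem.Str.len s))) "") = true :=
      (List.mem_filter.mp hmem).2
    -- the two picks have the same length …
    have hlen_eq : PySem.Str.len
        (PySem.List.pyGetD (pvMoleculeKeys.filter (fun s => PySem.Str.startswith ln s))
          (pvIdxmax ((pvMoleculeKeys.filter (fun s => PySem.Str.startswith ln s)).map
            (fun s => PySem.Str.len s))) "") = PySem.Str.len k := by
      apply le_antisymm
      · exact pv_find_desc_max pv_desc_pairwise hf _
          (pv_mem_desc.mpr (List.mem_filter.mp hmem).1) hpfxf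
      · exact hmaxP k hkP
    -- … and both are prefixes of ln, hence equal
    have hpfx_eq : PySem.List.pyGetD (pvMoleculeKeys.filter (fun s => PySem.Str.startswith ln s))
        (pvIdxmax ((pvMoleculeKeys.filter (fun s => PySem.Str.startswith ln s)).map
          (fun s => PySem.Str.len s))) "" = k := by
      apply String.toList_inj.mp
      apply pv_prefix_eq_of_len_eq (l := ln.toList)
      · exact (PySem.Chars.startswith_iff _ _).mp (by simpa using hpfxf)
      · exact (PySem.Chars.startswith_iff _ _).mp (by simpa using hkf)
      · have := hlen_eq
        simp only [PySem.Str.len_eq] at this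
        exact_mod_cast this
    rw [if_neg (by simpa [List.length_eq_zero_iff] using hne), hpfx_eq]

-- ===== VERDICT (by name: the statement is the Claim_ definition above) =====
theorem molecule_and_transition_spec : Claim_equal_molecule_and_transition := by
  intro line_name _ _
  exact congrArg
    (fun z => if PySem.Str.isIn "_" line_name = false then (("", "") : String × String) else z)
    (pv_core (PySem.Str.strip (PySem.Str.lower line_name)))
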